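-- pv_equiv track=rewrite | github.com/logflux/logflux | src/logflux/iplom.py | groupby_len
-- ===== SOURCE A (Python) =====
-- def groupby_len(logs):
--     len2tokens = {}
--
--     for log in logs:
--         log_tokens = log.split()
--         log_len = len(log_tokens)
--
--         if log_len not in len2tokens:
--             len2tokens[log_len] = []
--
--         len2tokens[log_len].append(log_tokens)
--
--     return len2tokens
-- ===== SOURCE B (Python) =====
-- def groupby_len(logs):
--     # Two-pass decomposition: tokenize once, collect the distinct lengths in
--     # first-occurrence order, then build each group with one filter pass.
--     toks = [log.split() for log in logs]
--     lens = []
--     for t in toks: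
--         if len(t) not in lens:
--             lens.append(len(t))
--     return {n: [t for t in toks if len(t) == n] for n in lens}
-- ===== Notes on version B (the rewrite author's own statement) =====
-- stated objective: alternative
-- what changed: Replaces A's single incremental dict-insertion pass with a two-phase plan: tokenize all logs once, dedup the token-count keys in first-occurrence order, then build each group by a per-key filter over the tokenized list.
import Mathlib
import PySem

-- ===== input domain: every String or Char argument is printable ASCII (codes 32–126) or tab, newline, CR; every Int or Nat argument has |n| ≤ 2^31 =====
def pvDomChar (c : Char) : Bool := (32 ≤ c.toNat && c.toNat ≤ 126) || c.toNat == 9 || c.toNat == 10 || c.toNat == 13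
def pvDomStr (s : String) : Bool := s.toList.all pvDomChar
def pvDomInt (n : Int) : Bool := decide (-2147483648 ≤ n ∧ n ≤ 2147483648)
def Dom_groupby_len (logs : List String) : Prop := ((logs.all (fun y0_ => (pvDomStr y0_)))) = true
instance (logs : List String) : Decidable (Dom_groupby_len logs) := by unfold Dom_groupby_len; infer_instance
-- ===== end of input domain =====

-- B replaces A's single incremental dict-insertion pass by a two-phase plan (tokenize, dedup the
-- length keys in first-occurrence order, then one filter pass per key); alternative, not faster.

-- ===== PORT A =====
def groupby_len (logs : List String) : List (Int × List (List String)) :=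
  (logs.foldl
    (fun (len2tokens : PySem.Dict Int (List (List String))) log =>
      let log_tokens := PySem.Str.split₀ log
      let log_len : Int := log_tokens.length
      let len2tokens :=
        if len2tokens.contains log_len then len2tokens
        else len2tokens.insert log_len []
      -- len2tokens[log_len].append(log_tokens): the key is present here, so the
      -- default [] of modify is never used and this is exact
      len2tokens.modify log_len [] (fun xs => xs ++ [log_tokens]))
    PySem.Dict.empty).items

-- ===== PORT B =====
def groupby_len_alt (logs : List String) : List (Int × List (List String)) :=
  let toks := logs.map (fun log => PySem.Str.split₀ log)
  let lens : List Int := toks.foldl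
    (fun acc t => if acc.contains ((t.length : Int)) then acc else acc ++ [(t.length : Int)]) []
  lens.map (fun n => (n, toks.filter (fun t => ((t.length : Int) == n))))

-- ===== PRECONDITION & SPEC =====
def Spec_groupby_len (logs : List String) (out : List (Int × List (List String))) : Prop := out = groupby_len_alt logs
instance (logs : List String) (out : List (Int × List (List String))) : Decidable (Spec_groupby_len logs out) := by unfold Spec_groupby_len; infer_instance

-- ===== CLAIM (what is proved, stated in full; the proofs are below) =====
def Claim_equal_groupby_len : Prop := ∀ (logs : List String), Dom_groupby_len logs → Spec_groupby_len logs (groupby_len logs)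

-- ===== LEMMAS AND PROOFS =====

-- one A-loop step equals a bare modify (the insert of [] is absorbed)
theorem pv_step_eq (d : PySem.Dict Int (List (List String))) (t : List String) :
    (let d' := if d.contains ((t.length : Int)) then d else d.insert ((t.length : Int)) [];
     d'.modify ((t.length : Int)) [] (fun xs => xs ++ [t]))
      = d.modify ((t.length : Int)) [] (fun xs => xs ++ [t]) := by
  by_cases h : d.contains ((t.length : Int)) = true
  · simp [h]
  · simp only [Bool.not_eq_true] at h
    simp only [h, if_neg Bool.false_ne_true, PySem.Dict.modify,
      PySem.Dict.getD_insert_self, PySem.Dict.insert_insert_self,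
      PySem.Dict.getD_of_not_contains d [] h]

-- A's result, characterised: distinct lengths in first-occurrence order, each with its filter
theorem pv_A_eq (logs : List String) :
    groupby_len logs =
      (PySem.Set.ofList ((logs.map (fun log => PySem.Str.split₀ log)).map
          (fun t => (t.length : Int)))).map
        (fun k => (k, (logs.map (fun log => PySem.Str.split₀ log)).filter
            (fun t => ((t.length : Int) == k)))) := by
  set ts := logs.map (fun log => PySem.Str.split₀ log) with hts
  have hbody : groupby_len logs =
      (ts.foldl (fun d t => d.modify ((t.length : Int)) [] (fun xs => xs ++ [t]))
        PySem.Dict.empty).items := by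
    unfold groupby_len
    rw [hts, List.foldl_map]
    have hf : (fun (d : PySem.Dict Int (List (List String))) (log : String) =>
        (fun d t => d.modify ((t.length : Int)) [] (fun xs => xs ++ [t])) d (PySem.Str.split₀ log))
        = fun (d : PySem.Dict Int (List (List String))) (log : String) =>
            let log_tokens := PySem.Str.split₀ log
            let log_len : Int := log_tokens.length
            let d' := if d.contains log_len then d else d.insert log_len []
            d'.modify log_len [] (fun xs => xs ++ [log_tokens]) := by
      funext d log
      exact (pv_step_eq d (PySem.Str.split₀ log)).symm
    rw [hf]
  set D := ts.foldl (fun d t => d.modify ((t.length : Int)) [] (fun xs => xs ++ [t]))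
      PySem.Dict.empty with hD
  have hkeys : D.keys = PySem.Set.ofList (ts.map (fun t => (t.length : Int))) := by
    have := PySem.Dict.keys_foldl_modify_key ts (fun t => ((t.length : Int))) []
      (fun _ t xs => xs ++ [t]) PySem.Dict.empty
    simpa [PySem.Set.ofList, PySem.Set.update, PySem.Set.empty, PySem.Dict.empty,
      PySem.Dict.keys] using this
  have hnodup : D.keys.Nodup := by
    apply PySem.Dict.nodup_keys_foldl_modify_key ts (fun t => ((t.length : Int))) []
      (fun _ t xs => xs ++ [t]) PySem.Dict.empty
    simp [PySem.Dict.empty, PySem.Dict.keys]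
  have hpair : D = ((ts.map (fun t => (((t.length : Int)), t))).foldl
      (fun d p => d.modify p.1 [] (fun xs => xs ++ [p.2])) PySem.Dict.empty) := by
    rw [List.foldl_map]
  have hgetD : ∀ k : Int, D.getD k [] = ts.filter (fun t => ((t.length : Int) == k)) := by
    intro k
    rw [hpair, PySem.Dict.getD_foldl_modify_append]
    simp [List.filter_map, Function.comp_def]
  rw [hbody, PySem.Dict.items_eq_map_keys D hnodup [], hkeys]
  refine List.map_congr_left (fun k _ => ?_)
  rw [hgetD k]

-- B's dedup loop is Set.ofList of the lengths
theorem pv_B_lens (ts : List (List String)) :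
    ts.foldl (fun acc t =>
        if acc.contains ((t.length : Int)) then acc else acc ++ [(t.length : Int)]) [] =
      PySem.Set.ofList (ts.map (fun t => (t.length : Int))) := by
  rw [PySem.Set.ofList, List.foldl_map]
  rfl

-- ===== VERDICT (by name: the statement is the Claim_ definition above) =====
theorem groupby_len_spec : Claim_equal_groupby_len := by
  intro logs _
  unfold Spec_groupby_len groupby_len_alt
  simp only [pv_A_eq, pv_B_lens]
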